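-- pv_equiv track=rewrite | github.com/nibuman/Euler | Problem175.py | shortbin_to_sum
-- ===== SOURCE A (Python) =====
-- def shortbin_to_sum(shortbin):
--     this_sum = []
--     current_num = 1
--     power = sum(shortbin) - 1
--     for n in shortbin[::-1]:
--         for p in range(power, power-n, -1):
--             if current_num == 1: this_sum.append(2 ** p)
--         if current_num == 1:
--             current_num = 0
--         else: current_num = 1
--         power -= n
--     return this_sum
-- ===== SOURCE B (Python) =====
-- def shortbin_to_sum(shortbin):
--     bits = []
--     on = len(shortbin) % 2 == 1
--     for n in shortbin:
--         bits.extend([on] * n)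
--         on = not on
--     return [2 ** p for p in range(len(bits) - 1, -1, -1) if bits[p]]
-- ===== Notes on version B (the rewrite author's own statement) =====
-- stated objective: alternative
-- what changed: B first materializes the decoded bit table (one boolean per power, toggling per run, starting on iff len is odd), then emits powers in a separate descending scan, instead of A's interleaved reverse loop with decrement-and-toggle state.
-- outside the precondition, e.g. on shortbin_to_sum([-1, 2]): A returns [1, 0.5], B returns [2, 1]
import Mathlib
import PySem

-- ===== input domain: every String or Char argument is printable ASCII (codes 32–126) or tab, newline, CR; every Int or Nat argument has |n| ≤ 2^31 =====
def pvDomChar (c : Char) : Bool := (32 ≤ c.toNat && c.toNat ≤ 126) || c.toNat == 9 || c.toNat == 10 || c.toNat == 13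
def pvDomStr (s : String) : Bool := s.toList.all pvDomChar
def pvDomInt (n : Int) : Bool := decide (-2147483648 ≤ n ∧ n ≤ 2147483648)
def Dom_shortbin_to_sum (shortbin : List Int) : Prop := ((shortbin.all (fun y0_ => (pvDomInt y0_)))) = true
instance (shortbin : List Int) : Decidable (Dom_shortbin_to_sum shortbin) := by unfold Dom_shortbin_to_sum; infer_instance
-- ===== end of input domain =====

-- B decodes the run-length pattern into an explicit bit table, then emits the powers in a
-- separate descending scan; alternative decomposition (same cost), not claimed faster.

-- ===== PORT A =====
-- 2 ** p: on Pre_ every p reached is ≥ 0, so 2 ^ p.toNat is exact there.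
def shortbin_to_sum (shortbin : List Int) : List Int :=
  let rev := (PySem.List.slice? shortbin none none (-1)).getD []
  let st := rev.foldl
    (fun (st : List Int × Int × Int) n =>
      let this_sum := (PySem.List.pyRange st.2.2 (st.2.2 - n) (-1)).foldl
        (fun acc p => if st.2.1 == 1 then acc ++ [2 ^ p.toNat] else acc) st.1
      let current : Int := if st.2.1 == 1 then 0 else 1
      (this_sum, current, st.2.2 - n))
    ([], 1, shortbin.sum - 1)
  st.1

-- ===== PORT B =====
-- [on] * n is List.replicate n.toNat on (empty for n ≤ 0, as in Python);
-- every index p in the scan is 0 ≤ p < len bits, so bits.getD p.toNat false is exact bits[p].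
def shortbin_to_sum_alt (shortbin : List Int) : List Int :=
  let st := shortbin.foldl
    (fun (st : List Bool × Bool) n => (st.1 ++ List.replicate n.toNat st.2, !st.2))
    ([], shortbin.length % 2 == 1)
  let bits := st.1
  (PySem.List.pyRange ((bits.length : Int) - 1) (-1) (-1)).filterMap
    (fun p => if bits.getD p.toNat false then some (2 ^ p.toNat) else none)

-- ===== PRECONDITION & SPEC =====
-- Pre_ excludes lists containing a negative entry: run-length counts are naturally
-- nonnegative, and on negative entries A can append 2**p for negative p, a float
-- (not an Int), e.g. A([-1, 2]) = [1, 0.5].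
def Pre_shortbin_to_sum (shortbin : List Int) : Prop := ∀ n ∈ shortbin, 0 ≤ n
instance (shortbin : List Int) : Decidable (Pre_shortbin_to_sum shortbin) := by
  unfold Pre_shortbin_to_sum; infer_instance

def pvWitness_shortbin_to_sum : List Int := [1, 2, 0, 3]

def Spec_shortbin_to_sum (shortbin : List Int) (out : List Int) : Prop := out = shortbin_to_sum_alt shortbin
instance (shortbin : List Int) (out : List Int) : Decidable (Spec_shortbin_to_sum shortbin out) := by unfold Spec_shortbin_to_sum; infer_instance

-- ===== CLAIM (what is proved, stated in full; the proofs are below) =====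
def Claim_equal_shortbin_to_sum : Prop := ∀ (shortbin : List Int), Dom_shortbin_to_sum shortbin → Pre_shortbin_to_sum shortbin → Spec_shortbin_to_sum shortbin (shortbin_to_sum shortbin)

-- ===== LEMMAS AND PROOFS =====

-- [2^p, 2^(p-1), ..., 2^(p-m+1)]
def descPow (p : Int) (m : Nat) : List Int :=
  (List.range m).map (fun i : Nat => (2:Int) ^ (p - (i : Int)).toNat)

-- reference: runs processed from the top power down, flag toggling between runs
def refR : List Int → Int → Bool → List Int
  | [], _, _ => []
  | n :: t, p, c => (if c then descPow p n.toNat else []) ++ refR t (p - n) (!c)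

-- the decoded bit table, lowest power first
def bitsOf : List Int → Bool → List Bool
  | [], _ => []
  | n :: t, s => List.replicate n.toNat s ++ bitsOf t (!s)

-- emission along the reversed bit table
def emitE : List Bool → Int → List Int
  | [], _ => []
  | b :: rest, top => (if b then [2 ^ top.toNat] else []) ++ emitE rest (top - 1)

theorem foldl_app {α : Type} (l : List α) (f : α → Int) (acc : List Int) :
    l.foldl (fun a x => a ++ [f x]) acc = acc ++ l.map f := by
  induction l generalizing acc <;> simp [*]

theorem innerA (p n : Int) (c : Int) (acc : List Int) (hn : 0 ≤ n) :
    (PySem.List.pyRange p (p - n) (-1)).foldl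
      (fun acc q => if c == 1 then acc ++ [2 ^ q.toNat] else acc) acc
      = acc ++ (if c == 1 then descPow p n.toNat else []) := by
  have h : p - (p - n) = n := by ring
  rw [PySem.List.pyRange_neg_one, h]
  cases hc : (c == 1) with
  | false =>
    simp only [hc, Bool.false_eq_true, if_false]
    induction ((List.range n.toNat).map (fun k => p - (k : Int))) generalizing acc with
    | nil => simp
    | cons x xs ih => simpa using ih acc
  | true =>
    simp only [hc, if_true]
    rw [List.foldl_map, foldl_app]
    simp only [descPow]

theorem outerA (r : List Int) (acc : List Int) (c p : Int) (hc : c = 0 ∨ c = 1)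
    (hr : ∀ n ∈ r, 0 ≤ n) :
    (r.foldl
      (fun (st : List Int × Int × Int) n =>
        let this_sum := (PySem.List.pyRange st.2.2 (st.2.2 - n) (-1)).foldl
          (fun acc p => if st.2.1 == 1 then acc ++ [2 ^ p.toNat] else acc) st.1
        let current : Int := if st.2.1 == 1 then 0 else 1
        (this_sum, current, st.2.2 - n)) (acc, c, p)).1
      = acc ++ refR r p (c == 1) := by
  induction r generalizing acc c p with
  | nil => simp [refR]
  | cons n t ih =>
    have hn : 0 ≤ n := hr n (by simp)
    have ht : ∀ m ∈ t, 0 ≤ m := fun m hm => hr m (by simp [hm])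
    have hc' : (if c == 1 then (0:Int) else 1) = 0 ∨ (if c == 1 then (0:Int) else 1) = 1 := by
      rcases hc with h | h <;> simp [h]
    have htog : ((if c == 1 then (0:Int) else 1) == 1) = !(c == 1) := by
      rcases hc with h | h <;> simp [h]
    show (t.foldl _ ((PySem.List.pyRange p (p - n) (-1)).foldl
        (fun acc q => if c == 1 then acc ++ [2 ^ q.toNat] else acc) acc,
        (if c == 1 then (0:Int) else 1), p - n)).1 = _
    rw [ih _ _ _ hc' ht, innerA p n c acc hn, htog, refR, List.append_assoc]

theorem A_eq_ref (l : List Int) (hl : ∀ n ∈ l, 0 ≤ n) :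
    shortbin_to_sum l = refR l.reverse (l.sum - 1) true := by
  show ((((PySem.List.slice? l none none (-1)).getD []).foldl _ ([], 1, l.sum - 1)).1 : List Int) = _
  rw [PySem.List.slice?_none_none_neg_one, Option.getD_some,
      outerA l.reverse [] 1 (l.sum - 1) (Or.inr rfl) (by simpa using hl)]
  simp

theorem bitsOf_append (ys : List Int) (n : Int) (s : Bool) :
    bitsOf (ys ++ [n]) s
      = bitsOf ys s ++ List.replicate n.toNat (s ^^ decide (ys.length % 2 = 1)) := by
  induction ys generalizing s with
  | nil => simp [bitsOf]
  | cons y ys ih =>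
    rcases Nat.mod_two_eq_zero_or_one ys.length with h | h <;>
      simp [bitsOf, ih, h, Nat.add_mod, List.append_assoc]

theorem length_bitsOf (l : List Int) (s : Bool) (hl : ∀ n ∈ l, 0 ≤ n) :
    ((bitsOf l s).length : Int) = l.sum := by
  induction l generalizing s with
  | nil => simp [bitsOf]
  | cons n t ih =>
    have hn : 0 ≤ n := hl n (by simp)
    have ht : ∀ m ∈ t, 0 ≤ m := fun m hm => hl m (by simp [hm])
    simp [bitsOf, ih _ ht]
    omega

theorem descPow_succ (p : Int) (m : Nat) :
    descPow p (m + 1) = 2 ^ p.toNat :: descPow (p - 1) m := by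
  simp only [descPow, List.range_succ_eq_map, List.map_cons, List.map_map, Function.comp_def,
    List.cons.injEq]
  refine ⟨by norm_num, List.map_congr_left ?_⟩
  intro i _
  have h : p - ((i : Int) + 1) = p - 1 - (i : Int) := by ring
  push_cast [Nat.succ_eq_add_one]
  rw [h]

theorem emitE_replicate (m : Nat) (b : Bool) (rest : List Bool) (top : Int) :
    emitE (List.replicate m b ++ rest) top
      = (if b then descPow top m else []) ++ emitE rest (top - m) := by
  induction m generalizing top with
  | zero => simp [descPow]
  | succ m ih =>
    have h1 : top - ((m:Int) + 1) = top - 1 - m := by ring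
    cases b <;>
      simp [List.replicate_succ, emitE, ih, descPow_succ] <;> rw [h1]

theorem scan_eq_emitE (bits : List Bool) :
    (PySem.List.pyRange ((bits.length : Int) - 1) (-1) (-1)).filterMap
      (fun p => if bits.getD p.toNat false then some (2 ^ p.toNat) else none)
    = emitE bits.reverse ((bits.length : Int) - 1) := by
  induction bits using List.reverseRecOn with
  | nil => simp [emitE]
  | append_singleton ys b ih =>
    have hlen : ((ys ++ [b]).length : Int) - 1 = (ys.length : Int) := by simp
    rw [hlen, PySem.List.pyRange_neg_one_cons (by omega : (-1:Int) < (ys.length : Int)),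
        List.filterMap_cons]
    have hcongr := List.filterMap_congr (l := PySem.List.pyRange ((ys.length:Int) - 1) (-1) (-1))
      (f := fun p => if (ys ++ [b]).getD p.toNat false then some ((2:Int) ^ p.toNat) else none)
      (g := fun p => if ys.getD p.toNat false then some ((2:Int) ^ p.toNat) else none)
      (by
        intro p hp
        rw [PySem.List.mem_pyRange_neg_one] at hp
        have hlt : p.toNat < ys.length := by omega
        simp [List.getD_eq_getElem?_getD, List.getElem?_append_left hlt])
    rw [hcongr, ih, List.reverse_append]
    have hget : (ys ++ [b]).getD ((ys.length : Int)).toNat false = b := by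
      simp [List.getD_eq_getElem?_getD]
    cases b <;> simp [emitE]

theorem emitE_bitsOf (l : List Int) (s : Bool) (top : Int) (hl : ∀ n ∈ l, 0 ≤ n) :
    emitE (bitsOf l s).reverse top
      = refR l.reverse top (s ^^ decide (l.length % 2 = 0)) := by
  induction l using List.reverseRecOn generalizing top with
  | nil => simp [bitsOf, refR, emitE]
  | append_singleton ys n ih =>
    have hn : 0 ≤ n := hl n (by simp)
    have hys : ∀ m ∈ ys, 0 ≤ m := fun m hm => hl m (by simp [hm])
    rw [bitsOf_append, List.reverse_append, List.reverse_replicate, emitE_replicate,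
        Int.toNat_of_nonneg hn, ih _ hys, List.reverse_append]
    simp only [List.reverse_singleton, List.singleton_append, refR]
    rcases Nat.mod_two_eq_zero_or_one ys.length with h | h <;>
      cases s <;> simp [h, Nat.add_mod]

theorem foldl_bitsOf (l : List Int) (acc : List Bool) (s : Bool) :
    (l.foldl (fun (st : List Bool × Bool) n => (st.1 ++ List.replicate n.toNat st.2, !st.2))
      (acc, s)).1 = acc ++ bitsOf l s := by
  induction l generalizing acc s with
  | nil => simp [bitsOf]
  | cons n t ih => simp [bitsOf, ih, List.append_assoc]

theorem B_eq_ref (l : List Int) (hl : ∀ n ∈ l, 0 ≤ n) :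
    shortbin_to_sum_alt l = refR l.reverse (l.sum - 1) true := by
  show (PySem.List.pyRange ((((l.foldl _ ([], l.length % 2 == 1)).1 : List Bool).length : Int) - 1) (-1) (-1)).filterMap _ = _
  rw [foldl_bitsOf l [] (l.length % 2 == 1), List.nil_append, scan_eq_emitE,
      length_bitsOf l _ hl, emitE_bitsOf l _ _ hl]
  rcases Nat.mod_two_eq_zero_or_one l.length with h | h <;> simp [h]

-- ===== VERDICT (by name: the statement is the Claim_ definition above) =====
theorem shortbin_to_sum_spec : Claim_equal_shortbin_to_sum := by
  intro l _ hpre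
  unfold Spec_shortbin_to_sum
  rw [A_eq_ref l hpre, B_eq_ref l hpre]
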